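-- pv_equiv track=rewrite | github.com/spack/spack | lib/spack/spack/util/generate_tests.py | seperate_compilers
-- ===== SOURCE A (Python) =====
-- def seperate_compilers(complr_list):
--     rtn_dict = {'compilers': {}}
--     for cmplr in complr_list:
--         cmplr = str(cmplr)
--         cmplr_name = cmplr.split('@')[0]
--         cmplr_version = cmplr.split('@')[1]
--         if cmplr_name not in rtn_dict['compilers'].keys():
--             rtn_dict['compilers'][cmplr_name] = {'versions': []}
--         rtn_dict['compilers'][cmplr_name]['versions'].append(cmplr_version)
--     return rtn_dict
-- ===== SOURCE B (Python) =====
-- def seperate_compilers(complr_list):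
--     # Two-pass grouping: extract (name, version) pairs once, take the distinct
--     # names in first-occurrence order, then build each group by filtering.
--     pairs = [(str(c).split('@')[0], str(c).split('@')[1]) for c in complr_list]
--     names = list(dict.fromkeys(name for name, _ in pairs))
--     return {'compilers': {n: {'versions': [v for m, v in pairs if m == n]}
--                           for n in names}}
-- ===== Notes on version B (the rewrite author's own statement) =====
-- stated objective: alternative
-- what changed: Replaces A's incremental dict mutation (key-existence check plus in-place version append per element) with a two-pass pipeline: extract all (name, version) pairs, dedup names in first-occurrence order, then build each group by a filter comprehension.
import Mathlib
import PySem

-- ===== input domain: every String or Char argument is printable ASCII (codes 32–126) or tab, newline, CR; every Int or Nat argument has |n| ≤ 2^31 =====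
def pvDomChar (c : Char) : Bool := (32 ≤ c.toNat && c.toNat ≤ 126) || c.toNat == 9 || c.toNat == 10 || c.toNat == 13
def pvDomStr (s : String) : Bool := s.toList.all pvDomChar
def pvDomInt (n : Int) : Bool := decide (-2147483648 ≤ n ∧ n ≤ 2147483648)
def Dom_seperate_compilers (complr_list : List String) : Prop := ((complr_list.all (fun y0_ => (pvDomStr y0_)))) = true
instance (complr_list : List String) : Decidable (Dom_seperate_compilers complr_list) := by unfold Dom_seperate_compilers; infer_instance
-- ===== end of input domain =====

-- B replaces A's incremental dict mutation with a two-pass pipeline (extract pairs, dedup names, group by filter); same cost, alternative structure.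


-- ===== PORT A =====
-- shared extraction, used verbatim by both Pythons: str(c).split('@')[0] / [1]
-- (the [1] index is total here via getD; Pre_ excludes the inputs where Python raises IndexError)
def pvNameOf (s : String) : String := ((PySem.Str.split? s "@").getD []).getD 0 ""
def pvVerOf (s : String) : String := ((PySem.Str.split? s "@").getD []).getD 1 ""

-- one iteration of A's for-loop on the compilers dict (ensure key, then append the version)
def pvStepA (d : List (String × List (String × List String))) (cmplr : String) :
    List (String × List (String × List String)) :=
  let name := pvNameOf cmplr
  let ver := pvVerOf cmplr
  let d' := if (d.map Prod.fst).contains name then d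
            else d ++ [(name, [("versions", ([] : List String))])]
  d'.map (fun p => if p.1 = name then
            (p.1, p.2.map (fun q => if q.1 = "versions" then (q.1, q.2 ++ [ver]) else q))
          else p)

def seperate_compilers (complr_list : List String) : List (String × List (String × List (String × List String))) :=
  [("compilers", complr_list.foldl pvStepA [])]

-- ===== PORT B =====
def seperate_compilers_alt (complr_list : List String) : List (String × List (String × List (String × List String))) :=
  let pairs := complr_list.map (fun c => (pvNameOf c, pvVerOf c))
  let names := PySem.List.dedup (pairs.map Prod.fst)
  [("compilers",
    names.map (fun n => (n, [("versions", (pairs.filter (fun p => p.1 == n)).map Prod.snd)])))]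

-- ===== PRECONDITION & SPEC =====
-- Pre_ excludes exactly the elements without an '@', on which A's split('@')[1] raises IndexError.
def Pre_seperate_compilers (complr_list : List String) : Prop :=
  ∀ s ∈ complr_list, 2 ≤ ((PySem.Str.split? s "@").getD []).length
instance (complr_list : List String) : Decidable (Pre_seperate_compilers complr_list) := by unfold Pre_seperate_compilers; infer_instance

def pvWitness_seperate_compilers : List String := ["gcc@9.4.0", "clang@12.0", "gcc@11.1"]

def Spec_seperate_compilers (complr_list : List String) (out : List (String × List (String × List (String × List String)))) : Prop := out = seperate_compilers_alt complr_list
instance (complr_list : List String) (out : List (String × List (String × List (String × List String)))) : Decidable (Spec_seperate_compilers complr_list out) := by unfold Spec_seperate_compilers; infer_instance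

-- ===== CLAIM (what is proved, stated in full; the proofs are below) =====
def Claim_equal_seperate_compilers : Prop := ∀ (complr_list : List String), Dom_seperate_compilers complr_list → Pre_seperate_compilers complr_list → Spec_seperate_compilers complr_list (seperate_compilers complr_list)

-- ===== LEMMAS AND PROOFS =====

-- B's grouping, phrased on the pair list (what the foldl of A computes)
def pvGroup (ps : List (String × String)) : List (String × List (String × List String)) :=
  (PySem.List.dedup (ps.map Prod.fst)).map
    (fun n => (n, [("versions", (ps.filter (fun p => p.1 == n)).map Prod.snd)]))

-- one iteration of A's loop, on the extracted pair
def pvStepP (d : List (String × List (String × List String))) (p : String × String) :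
    List (String × List (String × List String)) :=
  let d' := if (d.map Prod.fst).contains p.1 then d
            else d ++ [(p.1, [("versions", ([] : List String))])]
  d'.map (fun q => if q.1 = p.1 then
            (q.1, q.2.map (fun r => if r.1 = "versions" then (r.1, r.2 ++ [p.2]) else r))
          else q)

theorem pvGroup_fst (ps : List (String × String)) :
    (pvGroup ps).map Prod.fst = PySem.List.dedup (ps.map Prod.fst) := by
  simp [pvGroup, List.map_map, Function.comp_def]

theorem pvFilter_nil_of_not_mem (ps : List (String × String)) (n : String)
    (h : n ∉ ps.map Prod.fst) : ps.filter (fun p => p.1 == n) = [] := by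
  induction ps with
  | nil => rfl
  | cons a t ih =>
    simp only [List.map_cons, List.mem_cons, not_or] at h
    have hne : ¬ (a.1 == n) = true := by simp [beq_iff_eq]; exact fun he => h.1 he.symm
    simp [hne, ih h.2]

theorem pvGroup_snoc (ps : List (String × String)) (p : String × String) :
    pvGroup (ps ++ [p]) = pvStepP (pvGroup ps) p := by
  have hfst := pvGroup_fst ps
  by_cases hmem : p.1 ∈ ps.map Prod.fst
  · -- name already seen: dedup unchanged, the matching entry gets p.2 appended
    have hc : (List.foldl PySem.Set.add PySem.Set.empty (List.map Prod.fst ps)).contains p.1 = true := by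
      have h := (PySem.List.mem_dedup (ps.map Prod.fst) p.1).mpr hmem
      simpa [PySem.List.dedup, PySem.Set.ofList, List.contains_iff_mem] using h
    have hded : PySem.List.dedup ((ps ++ [p]).map Prod.fst) = PySem.List.dedup (ps.map Prod.fst) := by
      simp only [PySem.List.dedup, PySem.Set.ofList, List.map_append, List.map_cons,
        List.map_nil, List.foldl_append, List.foldl_cons, List.foldl_nil, PySem.Set.add, hc]
      simp
    have hcont : ((pvGroup ps).map Prod.fst).contains p.1 = true := by
      rw [hfst]
      simpa [PySem.List.dedup, PySem.Set.ofList] using hc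
    simp only [pvStepP, hcont, if_true]
    simp only [pvGroup]
    rw [hded]
    rw [List.map_map]
    apply List.map_congr_left
    intro n _
    by_cases hn : n = p.1
    · subst hn
      simp [Function.comp, List.filter_append]
    · have hn' : ¬ (p.1 == n) = true := by simp [beq_iff_eq]; exact fun h => hn h.symm
      simp [Function.comp, List.filter_append, hn, hn']
  · -- new name: appended at the end with its single version
    have hc : (List.foldl PySem.Set.add PySem.Set.empty (List.map Prod.fst ps)).contains p.1 = false := by
      have h : p.1 ∉ PySem.List.dedup (ps.map Prod.fst) := by
        rw [PySem.List.mem_dedup]; exact hmem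
      simpa [PySem.List.dedup, PySem.Set.ofList, List.contains_eq_mem] using h
    have hded : PySem.List.dedup ((ps ++ [p]).map Prod.fst)
        = PySem.List.dedup (ps.map Prod.fst) ++ [p.1] := by
      simp only [PySem.List.dedup, PySem.Set.ofList, List.map_append, List.map_cons,
        List.map_nil, List.foldl_append, List.foldl_cons, List.foldl_nil, PySem.Set.add, hc,
        Bool.false_eq_true]
      simp
    have hcont : ((pvGroup ps).map Prod.fst).contains p.1 = false := by
      rw [hfst]
      simpa [PySem.List.dedup, PySem.Set.ofList] using hc
    simp only [pvStepP, hcont, Bool.false_eq_true, if_false]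
    simp only [pvGroup]
    rw [hded]
    simp only [List.map_append, List.map_map]
    congr 1
    · apply List.map_congr_left
      intro n hn
      have hn' : n ≠ p.1 := by
        rintro rfl; exact hmem ((PySem.List.mem_dedup _ _).mp hn)
      have hn'' : ¬ (p.1 == n) = true := by simp [beq_iff_eq]; exact fun h => hn' h.symm
      simp [Function.comp, List.filter_append, hn', hn'']
    · simp [List.filter_append, List.filter_cons,
        pvFilter_nil_of_not_mem ps p.1 hmem]

theorem pvFoldl_eq_group (ps : List (String × String)) :
    ps.foldl pvStepP [] = pvGroup ps := by
  induction ps using List.reverseRecOn with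
  | nil => rfl
  | append_singleton t p ih => rw [List.foldl_append, List.foldl_cons, List.foldl_nil, ih,
      pvGroup_snoc]

-- ===== VERDICT (by name: the statement is the Claim_ definition above) =====
theorem seperate_compilers_spec : Claim_equal_seperate_compilers := by
  intro l _ _
  show _ = _
  unfold seperate_compilers seperate_compilers_alt
  have h2 : pvStepA = fun d c => pvStepP d (pvNameOf c, pvVerOf c) :=
    funext fun d => funext fun c => rfl
  rw [h2, ← List.foldl_map, pvFoldl_eq_group]
  simp [pvGroup, List.map_map]
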